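-- pv_equiv track=rewrite | github.com/SteveImmanuel/code-practice | 2550-count-collisions-of-monkeys-on-a-polygon/2550-count-collisions-of-monkeys-on-a-polygon.py | monkeyMove
-- ===== SOURCE A (Python) =====
-- def monkeyMove(n: int) -> int:
--     base = 2
--     exponent = n
--     modulus = 1000000007
--
--     res = 1
--     while exponent > 0:
--         if exponent % 2 == 1:
--             res = (res * base) % modulus
--         base = (base * base) % modulus
--         exponent = exponent // 2
--
--
--     return (res - 2) % 1000000007
-- ===== SOURCE B (Python) =====
-- def monkeyMove(n: int) -> int:
--     M = 1000000007
--
--     def fastpow(e: int) -> int: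
--         if e <= 0:
--             return 1
--         h = fastpow(e // 2)
--         h = h * h % M
--         if e % 2 == 1:
--             h = h * 2 % M
--         return h
--
--     return (fastpow(n) - 2) % 1000000007
-- ===== Notes on version B (the rewrite author's own statement) =====
-- stated objective: alternative
-- what changed: Replaced A's iterative bit-by-bit square-and-multiply loop (mutating base/res/exponent) with a recursive divide-and-conquer fast power that squares the single recursive result for e//2.
import Mathlib
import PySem

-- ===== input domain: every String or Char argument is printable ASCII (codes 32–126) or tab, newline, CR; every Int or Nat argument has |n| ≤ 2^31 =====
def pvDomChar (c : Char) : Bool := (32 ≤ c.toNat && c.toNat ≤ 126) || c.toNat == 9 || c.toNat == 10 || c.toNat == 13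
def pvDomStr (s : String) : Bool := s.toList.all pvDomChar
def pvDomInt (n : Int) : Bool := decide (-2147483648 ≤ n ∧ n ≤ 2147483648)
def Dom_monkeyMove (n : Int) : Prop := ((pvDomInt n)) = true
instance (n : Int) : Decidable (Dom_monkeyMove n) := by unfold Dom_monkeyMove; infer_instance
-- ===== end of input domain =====

-- B replaces A's iterative square-and-multiply loop by a recursive divide-and-conquer
-- fast power (objective: alternative decomposition, same asymptotic cost).

-- ===== PORT A =====
-- the while loop of A: state (base, res, exponent)
def monkeyMoveLoop (base res exponent : Int) : Int :=
  if _h : exponent > 0 then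
    let res' := if PySem.Int.mod exponent 2 = 1 then PySem.Int.mod (res * base) 1000000007 else res
    monkeyMoveLoop (PySem.Int.mod (base * base) 1000000007) res' (PySem.Int.floordiv exponent 2)
  else res
termination_by exponent.toNat
decreasing_by
  rw [PySem.Int.floordiv_eq_ediv_of_pos (by omega)]
  omega

def monkeyMove (n : Int) : Int :=
  PySem.Int.mod (monkeyMoveLoop 2 1 n - 2) 1000000007

-- ===== PORT B =====
def fastpow (e : Int) : Int :=
  if _h : e ≤ 0 then 1
  else
    let h1 := fastpow (PySem.Int.floordiv e 2)
    let h2 := PySem.Int.mod (h1 * h1) 1000000007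
    if PySem.Int.mod e 2 = 1 then PySem.Int.mod (h2 * 2) 1000000007 else h2
termination_by e.toNat
decreasing_by
  rw [PySem.Int.floordiv_eq_ediv_of_pos (by omega)]
  omega

def monkeyMove_alt (n : Int) : Int :=
  PySem.Int.mod (fastpow n - 2) 1000000007

-- ===== PRECONDITION & SPEC =====
def Spec_monkeyMove (n : Int) (out : Int) : Prop := out = monkeyMove_alt n
instance (n : Int) (out : Int) : Decidable (Spec_monkeyMove n out) := by unfold Spec_monkeyMove; infer_instance

-- ===== CLAIM (what is proved, stated in full; the proofs are below) =====
def Claim_equal_monkeyMove : Prop := ∀ (n : Int), Dom_monkeyMove n → Spec_monkeyMove n (monkeyMove n)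

-- ===== LEMMAS AND PROOFS =====

-- both sides compute a power of 2 mod 1000000007; each is characterised against the closed form

theorem monkeyMoveLoop_eq (k : Nat) : ∀ (b r e : Int), e.toNat ≤ k → 0 ≤ b → 0 ≤ r → r < 1000000007 →
    monkeyMoveLoop b r e = (r * b ^ e.toNat) % 1000000007 := by
  induction k with
  | zero =>
    intro b r e hk hb hr hr'
    rw [monkeyMoveLoop]
    have hne : ¬ e > 0 := by omega
    simp [hne, Nat.le_zero.mp hk]
    omega
  | succ k ih =>
    intro b r e hk hb hr hr'
    rw [monkeyMoveLoop]
    by_cases he : e > 0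
    · simp only [he, dite_true]
      have hfd : PySem.Int.floordiv e 2 = e / 2 := PySem.Int.floordiv_eq_ediv_of_pos (by omega)
      have hmd : PySem.Int.mod e 2 = e % 2 := PySem.Int.mod_eq_emod_of_pos (by omega)
      have hmb : PySem.Int.mod (b * b) 1000000007 = (b * b) % 1000000007 :=
        PySem.Int.mod_eq_emod_of_pos (by omega)
      have hmr : PySem.Int.mod (r * b) 1000000007 = (r * b) % 1000000007 :=
        PySem.Int.mod_eq_emod_of_pos (by omega)
      have h2 : (e / 2).toNat ≤ k := by omega
      have hbb : ((b * b) % 1000000007 : Int) ≡ b * b [ZMOD 1000000007] :=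
        Int.emod_emod_of_dvd _ dvd_rfl
      by_cases hodd : e % 2 = 1
      · have hsplit : e.toNat = 2 * (e / 2).toNat + 1 := by omega
        rw [hfd, hmd, hmb, hmr]
        simp only [hodd, if_true]
        rw [ih ((b * b) % 1000000007) ((r * b) % 1000000007) (e / 2) h2
            (Int.emod_nonneg _ (by omega)) (Int.emod_nonneg _ (by omega))
            (Int.emod_lt_of_pos _ (by omega))]
        have hrb : ((r * b) % 1000000007 : Int) ≡ r * b [ZMOD 1000000007] :=
          Int.emod_emod_of_dvd _ dvd_rfl
        have hmeq : ((r * b) % 1000000007) * ((b * b) % 1000000007) ^ (e / 2).toNat ≡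
            (r * b) * (b * b) ^ (e / 2).toNat [ZMOD 1000000007] :=
          hrb.mul (hbb.pow _)
        have hpow : (r * b) * (b * b) ^ (e / 2).toNat = r * b ^ e.toNat := by
          rw [hsplit, show b * b = b ^ 2 from (sq b).symm, ← pow_mul, pow_succ]
          ring
        rw [← hpow]
        exact hmeq
      · have heven : e % 2 = 0 := by omega
        have hsplit : e.toNat = 2 * (e / 2).toNat := by omega
        rw [hfd, hmd, hmb]
        simp only [hodd, if_false]
        rw [ih ((b * b) % 1000000007) r (e / 2) h2 (Int.emod_nonneg _ (by omega)) hr hr']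
        have hmeq : r * ((b * b) % 1000000007) ^ (e / 2).toNat ≡
            r * (b * b) ^ (e / 2).toNat [ZMOD 1000000007] :=
          (Int.ModEq.refl r).mul (hbb.pow _)
        have hpow : r * (b * b) ^ (e / 2).toNat = r * b ^ e.toNat := by
          rw [hsplit, show b * b = b ^ 2 from (sq b).symm, ← pow_mul]
        rw [← hpow]
        exact hmeq
    · simp only [he, dite_false]
      have h0 : e.toNat = 0 := by omega
      simp [h0]
      omega

theorem fastpow_eq (k : Nat) : ∀ (e : Int), e.toNat ≤ k →
    fastpow e = (2 ^ e.toNat) % 1000000007 := by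
  induction k with
  | zero =>
    intro e hk
    rw [fastpow]
    have he : e ≤ 0 := by
      by_contra h
      have h0 : e.toNat = 0 := Nat.le_zero.mp hk
      omega
    have h0 : e.toNat = 0 := by omega
    simp [he, h0]
  | succ k ih =>
    intro e hk
    rw [fastpow]
    by_cases he : e ≤ 0
    · have h0 : e.toNat = 0 := by omega
      simp [he, h0]
    · simp only [he, dite_false]
      have hfd : PySem.Int.floordiv e 2 = e / 2 := PySem.Int.floordiv_eq_ediv_of_pos (by omega)
      have hmd : PySem.Int.mod e 2 = e % 2 := PySem.Int.mod_eq_emod_of_pos (by omega)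
      have hmod : ∀ x : Int, PySem.Int.mod x 1000000007 = x % 1000000007 := fun x =>
        PySem.Int.mod_eq_emod_of_pos (by omega)
      have h2 : (e / 2).toNat ≤ k := by omega
      rw [hfd, hmd, ih (e / 2) h2]
      have hq : ((2:Int) ^ (e / 2).toNat % 1000000007) ≡ 2 ^ (e / 2).toNat [ZMOD 1000000007] :=
        Int.emod_emod_of_dvd _ dvd_rfl
      have hsq : ((2:Int) ^ (e / 2).toNat % 1000000007) * (2 ^ (e / 2).toNat % 1000000007) % 1000000007 ≡
          2 ^ (e / 2).toNat * 2 ^ (e / 2).toNat [ZMOD 1000000007] :=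
        (Int.emod_emod_of_dvd _ dvd_rfl).trans (hq.mul hq)
      by_cases hodd : e % 2 = 1
      · have hsplit : e.toNat = 2 * (e / 2).toNat + 1 := by omega
        simp only [hodd, if_true, hmod]
        have hmeq := hsq.mul_right 2
        have hpow : (2:Int) ^ (e / 2).toNat * 2 ^ (e / 2).toNat * 2 = 2 ^ e.toNat := by
          rw [hsplit, ← pow_add, pow_succ, show (e / 2).toNat + (e / 2).toNat = 2 * (e / 2).toNat from by ring]
        rw [← hpow]
        exact hmeq
      · have heven : e % 2 = 0 := by omega
        have hsplit : e.toNat = 2 * (e / 2).toNat := by omega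
        simp only [hodd, if_false, hmod]
        have hpow : (2:Int) ^ (e / 2).toNat * 2 ^ (e / 2).toNat = 2 ^ e.toNat := by
          rw [hsplit, ← pow_add, show (e / 2).toNat + (e / 2).toNat = 2 * (e / 2).toNat from by ring]
        rw [← hpow]
        exact hq.mul hq

-- ===== VERDICT (by name: the statement is the Claim_ definition above) =====
theorem monkeyMove_spec : Claim_equal_monkeyMove := by
  intro n _
  unfold Spec_monkeyMove monkeyMove monkeyMove_alt
  rw [monkeyMoveLoop_eq n.toNat 2 1 n le_rfl (by omega) (by omega) (by omega),
      fastpow_eq n.toNat n le_rfl, one_mul]
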